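-- pv_equiv track=rewrite | github.com/YagoRizzetti/AlgoritmosYEstructurasDeDatos1 | SegundoParcial/practicap2.py | controltpra
-- ===== SOURCE A (Python) =====
-- def controltpra(x):
--     pl = ""
--     tienepor = False
--     countl = 0
--     countpcc = 0
--     for i in x:
--         if i == " " or i == ".":
--             if pl == "a" and tienepor:
--                 countpcc += 1
--             tienepor = False
--             countl = 0
--         else:
--             countl += 1
--             if countl == 1:
--                 pl = i
--             if i == "p" or i == "r":
--                 tienepor = True
--     return countpcc
-- ===== SOURCE B (Python) =====
-- def controltpra(x):
--     fields = x.replace(".", " ").split(" ")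
--     return sum(1 for w in fields[:-1] if w and w[0] == "a" and ("p" in w or "r" in w))
-- ===== Notes on version B (the rewrite author's own statement) =====
-- stated objective: faster
-- what changed: Replaces the stateful per-character scanner (first-letter/has-p-or-r/length flags) with tokenise-then-filter: split the string into fields, drop the final un-terminated field, count fields starting with 'a' that contain 'p' or 'r'.
import Mathlib
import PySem

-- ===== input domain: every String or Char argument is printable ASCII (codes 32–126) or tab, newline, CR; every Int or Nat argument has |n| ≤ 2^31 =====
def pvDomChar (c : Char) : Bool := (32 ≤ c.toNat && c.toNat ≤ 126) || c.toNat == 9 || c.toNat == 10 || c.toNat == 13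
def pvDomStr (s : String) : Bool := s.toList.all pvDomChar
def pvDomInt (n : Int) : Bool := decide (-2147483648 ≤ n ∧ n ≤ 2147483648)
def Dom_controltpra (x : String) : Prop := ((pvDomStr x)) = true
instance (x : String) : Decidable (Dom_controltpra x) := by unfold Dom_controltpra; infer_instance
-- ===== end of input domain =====

-- B replaces A's stateful per-character scanner by tokenise-then-filter (split on ' '/'.' and
-- count the terminated fields that start with 'a' and contain 'p' or 'r'); same O(n), measured faster by constant factor (bulk split/replace instead of a per-char loop).

-- ===== PORT A =====
def controltpra (x : String) : Int :=
  (x.toList.foldl (fun (s : String × Bool × Int × Int) (i : Char) =>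
    let (pl, tienepor, countl, countpcc) := s
    if i = ' ' ∨ i = '.' then
      (pl, false, 0, if pl = "a" ∧ tienepor = true then countpcc + 1 else countpcc)
    else
      let countl := countl + 1
      let pl := if countl = 1 then String.singleton i else pl
      let tienepor := if i = 'p' ∨ i = 'r' then true else tienepor
      (pl, tienepor, countl, countpcc)) ("", false, 0, 0)).2.2.2

-- ===== PORT B =====
def controltpra_alt (x : String) : Int :=
  let fields := (PySem.Str.split? (PySem.Str.replace x "." " ") " ").getD []
  ((fields.dropLast.countP (fun w =>
      decide (w ≠ "") && (PySem.Str.pyGet? w 0 == some 'a') &&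
      (PySem.Str.isIn "p" w || PySem.Str.isIn "r" w)) : Nat) : Int)

-- ===== PRECONDITION & SPEC =====
def Spec_controltpra (x : String) (out : Int) : Prop := out = controltpra_alt x
instance (x : String) (out : Int) : Decidable (Spec_controltpra x out) := by unfold Spec_controltpra; infer_instance

-- ===== CLAIM (what is proved, stated in full; the proofs are below) =====
def Claim_equal_controltpra : Prop := ∀ (x : String), Dom_controltpra x → Spec_controltpra x (controltpra x)

-- ===== LEMMAS AND PROOFS =====

-- delimiter and p/r tests
def pvIsDelim (c : Char) : Bool := c == ' ' || c == '.'
def pvPR (c : Char) : Bool := c == 'p' || c == 'r'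
def pvRepl (c : Char) : Char := if c == '.' then ' ' else c

-- fields of a char list, split at ' ' and '.' (includes the trailing, unterminated field)
def pvFields : List Char → List (List Char)
  | [] => [[]]
  | c :: cs => if pvIsDelim c then [] :: pvFields cs else (pvFields cs).modifyHead (c :: ·)

-- fields split at ' ' only
def pvFieldsSp : List Char → List (List Char)
  | [] => [[]]
  | c :: cs => if c == ' ' then [] :: pvFieldsSp cs else (pvFieldsSp cs).modifyHead (c :: ·)

-- a (fresh) field that gets counted
def pvGood (f : List Char) : Bool :=
  match f with
  | [] => false
  | c :: _ => (c == 'a') && f.any pvPR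

-- whether the first (partially processed) field gets counted, given A's loop state
def pvHeadGood (pl : String) (tp : Bool) (cl : Int) (f : List Char) : Bool :=
  if cl = 0 then
    match f with
    | [] => (pl == "a") && tp
    | c :: _ => (c == 'a') && (tp || f.any pvPR)
  else (pl == "a") && (tp || f.any pvPR)

-- increments A's loop will still make from state (pl, tp, cl)
def pvCount (pl : String) (tp : Bool) (cl : Int) (cs : List Char) : Int :=
  match (pvFields cs).dropLast with
  | [] => 0
  | f0 :: rest => (if pvHeadGood pl tp cl f0 then 1 else 0) + (rest.countP pvGood : Nat)

-- A's loop body, named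
def pvStepA (s : String × Bool × Int × Int) (i : Char) : String × Bool × Int × Int :=
  let (pl, tienepor, countl, countpcc) := s
  if i = ' ' ∨ i = '.' then
    (pl, false, 0, if pl = "a" ∧ tienepor = true then countpcc + 1 else countpcc)
  else
    let countl := countl + 1
    let pl := if countl = 1 then String.singleton i else pl
    let tienepor := if i = 'p' ∨ i = 'r' then true else tienepor
    (pl, tienepor, countl, countpcc)

theorem pvFields_ne_nil (cs : List Char) : pvFields cs ≠ [] := by
  induction cs with
  | nil => simp [pvFields]
  | cons c cs ih =>
    simp only [pvFields]
    split
    · simp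
    · cases h : pvFields cs with
      | nil => exact absurd h ih
      | cons a l => simp [List.modifyHead]

theorem pvFieldsSp_ne_nil (cs : List Char) : pvFieldsSp cs ≠ [] := by
  induction cs with
  | nil => simp [pvFieldsSp]
  | cons c cs ih =>
    simp only [pvFieldsSp]
    split
    · simp
    · cases h : pvFieldsSp cs with
      | nil => exact absurd h ih
      | cons a l => simp [List.modifyHead]

theorem pvSingleton_eq_a (c : Char) : (String.singleton c = "a") ↔ c = 'a' := by
  constructor
  · intro h
    have := congrArg String.toList h
    simpa using this
  · intro h; subst h; rfl

theorem pvCount_reset (pl : String) (cs : List Char) :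
    pvCount pl false 0 cs = (((pvFields cs).dropLast.countP pvGood : Nat) : Int) := by
  unfold pvCount
  cases h : (pvFields cs).dropLast with
  | nil => simp
  | cons f0 rest =>
    have hh : pvHeadGood pl false 0 f0 = pvGood f0 := by
      cases f0 <;> simp [pvHeadGood, pvGood]
    simp only [hh]
    simp [List.countP_cons]
    cases hg : pvGood f0 <;> simp [hg] <;> push_cast <;> ring

theorem pvLoopA (cs : List Char) : ∀ (pl : String) (tp : Bool) (cl cnt : Int), 0 ≤ cl →
    (cs.foldl pvStepA (pl, tp, cl, cnt)).2.2.2 = cnt + pvCount pl tp cl cs := by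
  induction cs with
  | nil => intro pl tp cl cnt _; simp [pvCount, pvFields]
  | cons c cs ih =>
    intro pl tp cl cnt hcl
    by_cases hd : c = ' ' ∨ c = '.'
    · -- delimiter step
      have hstep : pvStepA (pl, tp, cl, cnt) c
          = (pl, false, 0, if pl = "a" ∧ tp = true then cnt + 1 else cnt) := by
        simp [pvStepA, hd]
      rw [List.foldl_cons, hstep, ih pl false 0 _ le_rfl, pvCount_reset]
      have hfe : pvFields (c :: cs) = [] :: pvFields cs := by
        have : pvIsDelim c = true := by
          rcases hd with h | h <;> simp [pvIsDelim, h]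
        simp [pvFields, this]
      have hdl : (pvFields (c :: cs)).dropLast = [] :: (pvFields cs).dropLast := by
        rw [hfe]
        cases h : pvFields cs with
        | nil => exact absurd h (pvFields_ne_nil cs)
        | cons a l => simp
      have hhg : pvHeadGood pl tp cl ([] : List Char) = ((pl == "a") && tp) := by
        by_cases h0 : cl = 0 <;> simp [pvHeadGood, h0]
      unfold pvCount
      rw [hdl]
      simp only [hhg]
      by_cases hpa : pl = "a" ∧ tp = true
      · have : ((pl == "a") && tp) = true := by simp [hpa.1, hpa.2]
        simp [hpa, this]; ring
      · have : ((pl == "a") && tp) = false := by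
          rcases not_and_or.mp hpa with h | h <;> simp_all
        simp [hpa, this]
    · -- ordinary character
      have hstep : pvStepA (pl, tp, cl, cnt)  c
          = ((if cl + 1 = 1 then String.singleton c else pl),
             (if c = 'p' ∨ c = 'r' then true else tp), cl + 1, cnt) := by
        simp [pvStepA, hd]
      rw [List.foldl_cons, hstep, ih _ _ _ _ (by omega)]
      have hfe : pvFields (c :: cs) = (pvFields cs).modifyHead (c :: ·) := by
        have : pvIsDelim c = false := by
          simp only [not_or] at hd
          simp [pvIsDelim, hd.1, hd.2]
        simp [pvFields, this]
      congr 1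
      -- show pvCount is preserved by the character step
      obtain ⟨f0, rest, hfs⟩ : ∃ f0 rest, pvFields cs = f0 :: rest := by
        cases h : pvFields cs with
        | nil => exact absurd h (pvFields_ne_nil cs)
        | cons a l => exact ⟨a, l, rfl⟩
      unfold pvCount
      rw [hfe, hfs]
      cases rest with
      | nil => simp
      | cons r rs =>
        simp only [List.modifyHead, List.dropLast_cons₂, List.dropLast]
        congr 2
        -- head-goodness is preserved
        by_cases h0 : cl = 0
        · subst h0
          have h1 : (1 : Int) ≠ 0 := by norm_num
          simp only [pvHeadGood, if_pos rfl, zero_add, if_neg h1, if_pos rfl]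
          have hsing : ((String.singleton c == "a") : Bool) = (c == 'a') := by
            by_cases h : c = 'a'
            · subst h; rfl
            · have : ¬ String.singleton c = "a" := fun hh => h ((pvSingleton_eq_a c).mp hh)
              simp [h, this]
          by_cases hpr : c = 'p' ∨ c = 'r'
          · have : pvPR c = true := by rcases hpr with h | h <;> simp [pvPR, h]
            simp [hpr, hsing, this, List.any_cons]
          · have : pvPR c = false := by
              simp only [not_or] at hpr
              simp [pvPR, hpr.1, hpr.2]
            simp [hpr, hsing, this, List.any_cons]
        · have hne : cl + 1 ≠ 0 := by omega
          have hne1 : cl + 1 ≠ 1 := by omega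
          simp only [pvHeadGood, if_neg h0, if_neg hne, if_neg hne1]
          by_cases hpr : c = 'p' ∨ c = 'r'
          · have : pvPR c = true := by rcases hpr with h | h <;> simp [pvPR, h]
            simp [hpr, this, List.any_cons]
          · have : pvPR c = false := by
              simp only [not_or] at hpr
              simp [pvPR, hpr.1, hpr.2]
            simp [hpr, this, List.any_cons]

-- A computes the pvGood-count of the terminated fields
theorem pvA_eq (x : String) :
    controltpra x = (((pvFields x.toList).dropLast.countP pvGood : Nat) : Int) := by
  have h := pvLoopA x.toList "" false 0 0 le_rfl
  have hA : controltpra x = (x.toList.foldl pvStepA ("", false, 0, 0)).2.2.2 := rfl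
  rw [hA, h, zero_add, pvCount_reset]

-- ===== B side =====

theorem pvReplaceGo (n : Nat) : ∀ (l acc : List Char), l.length ≤ n →
    PySem.Chars.replace.go ['.'] [' '] n l acc = acc.reverse ++ l.map pvRepl := by
  induction n with
  | zero =>
    intro l acc h
    have : l = [] := by
      cases l with
      | nil => rfl
      | cons a t => simp at h
    subst this
    simp [PySem.Chars.replace.go]
  | succ n ih =>
    intro l acc h
    cases l with
    | nil => simp [PySem.Chars.replace.go]
    | cons c t =>
      simp only [PySem.Chars.replace.go]
      by_cases hc : c = '.'
      · subst hc
        have hp : List.isPrefixOf ['.'] ('.' :: t) = true := by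
          simp [List.isPrefixOf]
        rw [if_pos hp]
        simp only [List.length, List.drop]
        rw [ih t ([' '].reverse ++ acc) (by simpa using Nat.lt_succ_iff.mp (by simpa using h))]
        simp [pvRepl]
      · have hp : List.isPrefixOf ['.'] (c :: t) = false := by
          simp [List.isPrefixOf, Ne.symm hc]
        rw [if_neg (by simp [hp])]
        rw [ih t (c :: acc) (by simpa using Nat.lt_succ_iff.mp (by simpa using h))]
        simp [pvRepl, hc]

theorem pvReplace (cs : List Char) :
    PySem.Chars.replace cs ['.'] [' '] = cs.map pvRepl := by
  unfold PySem.Chars.replace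
  simp only [List.isEmpty_cons, if_neg]
  rw [pvReplaceGo cs.length cs [] le_rfl]
  simp

theorem pvSplitGo (n : Nat) : ∀ (l cur : List Char) (acc : List (List Char)), l.length < n →
    PySem.Chars.splitOn.go [' '] n l cur acc
      = acc.reverse ++ (pvFieldsSp l).modifyHead (cur.reverse ++ ·) := by
  induction n with
  | zero => intro l cur acc h; omega
  | succ n ih =>
    intro l cur acc h
    cases l with
    | nil => simp [PySem.Chars.splitOn.go, pvFieldsSp, List.modifyHead]
    | cons c t =>
      simp only [PySem.Chars.splitOn.go]
      by_cases hc : c = ' '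
      · subst hc
        have hp : List.isPrefixOf [' '] (' ' :: t) = true := by
          simp [List.isPrefixOf]
        rw [if_pos hp]
        simp only [List.length, List.drop]
        rw [ih t [] (List.reverse cur :: acc) (by simp at h; omega)]
        cases hft : pvFieldsSp t with
        | nil => exact absurd hft (pvFieldsSp_ne_nil t)
        | cons a l => simp [pvFieldsSp, hft, List.modifyHead]
      · have hp : List.isPrefixOf [' '] (c :: t) = false := by
          simp [List.isPrefixOf, Ne.symm hc]
        rw [if_neg (by simp [hp])]
        rw [ih t (c :: cur) acc (by simp at h; omega)]
        cases hft : pvFieldsSp t with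
        | nil => exact absurd hft (pvFieldsSp_ne_nil t)
        | cons a l => simp [pvFieldsSp, hc, hft, List.modifyHead]

theorem pvSplitOn (cs : List Char) :
    PySem.Chars.splitOn cs [' '] = pvFieldsSp cs := by
  unfold PySem.Chars.splitOn
  rw [pvSplitGo (cs.length + 1) cs [] [] (Nat.lt_succ_self _)]
  cases h : pvFieldsSp cs with
  | nil => exact absurd h (pvFieldsSp_ne_nil cs)
  | cons a l => simp

theorem pvFieldsSp_map (cs : List Char) : pvFieldsSp (cs.map pvRepl) = pvFields cs := by
  induction cs with
  | nil => rfl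
  | cons c t ih =>
    simp only [List.map_cons, pvFieldsSp, pvFields]
    by_cases h1 : c = '.'
    · subst h1; simp [pvRepl, pvIsDelim, ih]
    · by_cases h2 : c = ' '
      · subst h2; simp [pvRepl, pvIsDelim, ih]
      · have : pvRepl c = c := by simp [pvRepl, h1]
        rw [this]
        have hd : pvIsDelim c = false := by simp [pvIsDelim, h1, h2]
        simp [h2, hd, ih]

theorem pvInfixSingleton {a : Char} {l : List Char} : [a] <:+: l ↔ a ∈ l := by
  constructor
  · rintro ⟨s, t, rfl⟩; simp
  · intro hm
    obtain ⟨s, t, rfl⟩ := List.append_of_mem hm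
    exact ⟨s, t, by simp⟩

theorem pvCond_eq (f : List Char) :
    (decide ((String.ofList f) ≠ "") && (PySem.Str.pyGet? (String.ofList f) 0 == some 'a') &&
      (PySem.Str.isIn "p" (String.ofList f) || PySem.Str.isIn "r" (String.ofList f))) = pvGood f := by
  cases f with
  | nil => decide
  | cons c t =>
    have hw : (String.ofList (c :: t)).toList = c :: t := String.toList_ofList
    have h1 : (decide ((String.ofList (c :: t)) ≠ "")) = true := by
      simp only [decide_eq_true_eq]
      intro h
      have := congrArg String.toList h
      rw [hw] at this
      simp at this
    have h2 : PySem.Str.pyGet? (String.ofList (c :: t)) 0 = some c := by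
      rw [show ((0 : Int)) = ((0 : Nat) : Int) from rfl, PySem.Str.pyGet?_natCast]
      simp [hw]
    have h3 : (PySem.Str.isIn "p" (String.ofList (c :: t)) || PySem.Str.isIn "r" (String.ofList (c :: t)))
        = (c :: t).any pvPR := by
      rw [Bool.eq_iff_iff]
      simp only [Bool.or_eq_true, PySem.Str.isIn_iff_infix, hw, List.any_eq_true]
      constructor
      · rintro (h | h)
        · exact ⟨'p', (pvInfixSingleton).mp (by simpa using h), by decide⟩
        · exact ⟨'r', (pvInfixSingleton).mp (by simpa using h), by decide⟩
      · rintro ⟨a, ha, hpa⟩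
        have : a = 'p' ∨ a = 'r' := by
          revert hpa; simp [pvPR]
        rcases this with rfl | rfl
        · exact Or.inl (by simpa using (pvInfixSingleton).mpr ha)
        · exact Or.inr (by simpa using (pvInfixSingleton).mpr ha)
    rw [h1, h2, h3]
    simp [pvGood]

theorem pvB_eq (x : String) :
    controltpra_alt x = (((pvFields x.toList).dropLast.countP pvGood : Nat) : Int) := by
  unfold controltpra_alt
  have hy : (PySem.Str.replace x "." " ").toList = x.toList.map pvRepl := by
    rw [PySem.Str.toList_replace, show (".").toList = ['.'] from rfl,
        show (" ").toList = [' '] from rfl, pvReplace]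
  have hsplit : PySem.Str.split? (PySem.Str.replace x "." " ") " "
      = some ((pvFields x.toList).map String.ofList) := by
    unfold PySem.Str.split?
    rw [show (" ").toList = [' '] from rfl]
    simp [PySem.Chars.split?, hy, pvSplitOn, pvFieldsSp_map]
  rw [hsplit]
  simp only [Option.getD_some]
  rw [← List.map_dropLast, List.countP_map]
  have hfun : ((fun w =>
      decide (w ≠ "") && (PySem.Str.pyGet? w 0 == some 'a') &&
      (PySem.Str.isIn "p" w || PySem.Str.isIn "r" w)) ∘ String.ofList) = pvGood :=
    funext fun f => pvCond_eq f
  rw [hfun]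

-- ===== VERDICT (by name: the statement is the Claim_ definition above) =====
theorem controltpra_spec : Claim_equal_controltpra := by
  intro x _
  unfold Spec_controltpra
  rw [pvA_eq, pvB_eq]
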